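-- pv_equiv track=rewrite | github.com/xxyml/holophage | SaProt-1.3B_emb/scripts/extract_saprot_embeddings.py | coverage_weights
-- ===== SOURCE A (Python) =====
-- def coverage_weights(windows: list[tuple[int, int, str]]) -> list[int]:
--     weights: list[int] = []
--     covered_until = 0
--     for start, end, _ in windows:
--         unique = end - max(start, covered_until)
--         weights.append(max(1, unique))
--         covered_until = max(covered_until, end)
--     return weights
-- ===== SOURCE B (Python) =====
-- def coverage_weights(windows: list[tuple[int, int, str]]) -> list[int]:
--     # coverage begins at position 0, so clamp starts up to 0 once, then divide and conquer
--     ws = [(max(s, 0), e) for s, e, _ in windows]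
--     return _solve(ws)
--
--
-- def _solve(ws: list[tuple[int, int]]) -> list[int]:
--     if len(ws) <= 1:
--         return [max(1, e - s) for s, e in ws]
--     mid = len(ws) // 2
--     left, right = ws[:mid], ws[mid:]
--     m = max(e for _, e in left)
--     return _solve(left) + _solve([(max(s, m), e) for s, e in right])
-- ===== Notes on version B (the rewrite author's own statement) =====
-- stated objective: alternative
-- what changed: Replaces the single left-to-right loop threading a covered_until accumulator with a divide-and-conquer: split the windows in half, solve the left half, clamp the right half's starts by the maximum end of the left half, and solve it independently (O(n log n) instead of O(n), no running state).
import Mathlib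
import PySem

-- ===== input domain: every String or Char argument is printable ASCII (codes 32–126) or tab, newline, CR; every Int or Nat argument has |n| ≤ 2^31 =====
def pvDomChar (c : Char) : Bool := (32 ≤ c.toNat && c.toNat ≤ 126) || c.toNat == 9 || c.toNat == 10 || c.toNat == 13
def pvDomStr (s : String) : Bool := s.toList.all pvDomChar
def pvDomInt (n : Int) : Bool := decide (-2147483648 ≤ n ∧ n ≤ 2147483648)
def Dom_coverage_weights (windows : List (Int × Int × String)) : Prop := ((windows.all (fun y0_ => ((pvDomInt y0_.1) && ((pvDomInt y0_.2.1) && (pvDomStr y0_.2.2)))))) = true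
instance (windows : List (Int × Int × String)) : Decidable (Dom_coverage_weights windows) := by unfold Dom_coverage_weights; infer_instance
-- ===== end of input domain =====

-- B replaces A's single loop with a covered_until accumulator by a divide-and-conquer:
-- solve the left half, clamp the right half's starts by the left half's maximum end,
-- solve the right half independently (alternative decomposition, no running state).

-- ===== PORT A =====
-- A: one loop over windows threading (weights, covered_until)
def coverage_weights (windows : List (Int × Int × String)) : List Int :=
  (windows.foldl
    (fun (st : List Int × Int) w =>
      let unique := w.2.1 - max w.1 st.2
      (st.1 ++ [max 1 unique], max st.2 w.2.1))
    ([], 0)).1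

-- ===== PORT B =====
-- B helper _solve: divide and conquer on the (start, end) pairs
def cwSolve (ws : List (Int × Int)) : List Int :=
  if _h : ws.length ≤ 1 then ws.map (fun p => max 1 (p.2 - p.1))
  else
    let mid := ws.length / 2
    let left := ws.take mid
    let right := ws.drop mid
    -- left is nonempty here, so Python's max() cannot raise; .getD 0 is unreachable
    let m := (PySem.List.max? (left.map (fun p => p.2)) (fun y => y)).getD 0
    cwSolve left ++ cwSolve (right.map (fun p => (max p.1 m, p.2)))
termination_by ws.length
decreasing_by
  · simp only [List.length_take]; omega
  · simp only [List.length_map, List.length_drop]; omega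

def coverage_weights_alt (windows : List (Int × Int × String)) : List Int :=
  cwSolve (windows.map (fun w => (max w.1 0, w.2.1)))

-- ===== PRECONDITION & SPEC =====
def Spec_coverage_weights (windows : List (Int × Int × String)) (out : List Int) : Prop := out = coverage_weights_alt windows
instance (windows : List (Int × Int × String)) (out : List Int) : Decidable (Spec_coverage_weights windows out) := by unfold Spec_coverage_weights; infer_instance

-- ===== CLAIM (what is proved, stated in full; the proofs are below) =====
def Claim_equal_coverage_weights : Prop := ∀ (windows : List (Int × Int × String)), Dom_coverage_weights windows → Spec_coverage_weights windows (coverage_weights windows)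

-- ===== LEMMAS AND PROOFS =====

-- linear characterisation of A's loop on (start, end) pairs, running max c
def cwGo (c : Int) : List (Int × Int) → List Int
  | [] => []
  | p :: ps => max 1 (p.2 - max p.1 c) :: cwGo (max c p.2) ps

theorem cw_a_go (ws : List (Int × Int × String)) (acc : List Int) (c : Int) :
    (ws.foldl
      (fun (st : List Int × Int) w =>
        (st.1 ++ [max 1 (w.2.1 - max w.1 st.2)], max st.2 w.2.1))
      (acc, c)).1 = acc ++ cwGo c (ws.map (fun w => (w.1, w.2.1))) := by
  induction ws generalizing acc c with
  | nil => simp [cwGo]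
  | cons w ws ih => simp [cwGo, ih]

theorem cwGo_append (l1 l2 : List (Int × Int)) (c : Int) :
    cwGo c (l1 ++ l2) = cwGo c l1 ++ cwGo (l1.foldl (fun a p => max a p.2) c) l2 := by
  induction l1 generalizing c with
  | nil => simp [cwGo]
  | cons p ps ih => simp [cwGo, ih]

theorem foldl_max_snd_init (l : List (Int × Int)) (d x : Int) :
    l.foldl (fun a p => max a p.2) (max d x) =
      max d (l.foldl (fun a p => max a p.2) x) := by
  induction l generalizing x with
  | nil => rfl
  | cons p ps ih => simp only [List.foldl_cons, max_assoc, ih]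

theorem foldl_max_snd_map (l : List (Int × Int)) (x : Int) :
    l.foldl (fun a p => max a p.2) x = (l.map (fun p => p.2)).foldl max x := by
  induction l generalizing x with
  | nil => rfl
  | cons p ps ih => simp only [List.foldl_cons, List.map_cons, ih]

theorem cwSolve_clamp : ∀ (n : Nat) (ps : List (Int × Int)) (d : Int), ps.length ≤ n →
    cwSolve (ps.map (fun p => (max p.1 d, p.2))) = cwGo d ps := by
  intro n
  induction n with
  | zero =>
    intro ps d h
    have : ps = [] := List.eq_nil_of_length_eq_zero (Nat.le_zero.mp h)
    subst this; simp [cwSolve, cwGo]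
  | succ n ih =>
    intro ps d h
    rw [cwSolve.eq_def]
    by_cases h1 : ps.length ≤ 1
    · match ps, h1 with
      | [], _ => simp [cwGo]
      | [p], _ => simp [cwGo]
    · simp only [List.length_map, h1, dite_false]
      have hlen : 2 ≤ ps.length := by omega
      have hmid1 : 1 ≤ ps.length / 2 := by omega
      have hmidlt : ps.length / 2 < ps.length := by omega
      rw [← List.map_take, ← List.map_drop]
      -- the left half is nonempty: expose its head to evaluate max?
      obtain ⟨q, qs, hq⟩ : ∃ q qs, ps.take (ps.length / 2) = q :: qs := by
        rcases hl : ps.take (ps.length / 2) with _ | ⟨q, qs⟩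
        · exfalso
          have := congrArg List.length hl
          rw [List.length_take, List.length_nil] at this
          omega
        · exact ⟨q, qs, rfl⟩
      rw [hq]
      simp only [List.map_cons, PySem.List.max?_id_cons, Option.getD_some]
      have hm : (List.map (fun p => (max p.1 d, p.2)) qs |>.map (fun p => p.2)).foldl max (max q.1 d, q.2).2
          = (qs.map (fun p => p.2)).foldl max q.2 := by
        simp [List.map_map, Function.comp_def]
      rw [hm]
      set m := (qs.map (fun p => p.2)).foldl max q.2 with hmdef
      -- composed clamps merge: clamp by m after clamp by d = clamp by max d m
      have hcomp : (List.map (fun p => (max p.1 d, p.2)) (ps.drop (ps.length / 2))).map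
            (fun p => (max p.1 m, p.2))
          = (ps.drop (ps.length / 2)).map (fun p => (max p.1 (max d m), p.2)) := by
        simp only [List.map_map]
        apply List.map_congr_left
        intro p _
        simp [max_assoc]
      rw [hcomp]
      have hlt : (ps.take (ps.length / 2)).length ≤ n := by
        rw [List.length_take]; omega
      have hrt : (ps.drop (ps.length / 2)).length ≤ n := by
        rw [List.length_drop]; omega
      rw [hq] at hlt
      have ihl := ih (q :: qs) d hlt
      simp only [List.map_cons] at ihl
      rw [ihl, ih _ (max d m) hrt]
      -- reassemble via the append law for cwGo
      conv_rhs => rw [← List.take_append_drop (ps.length / 2) ps]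
      rw [cwGo_append, hq]
      congr 1
      simp only [List.foldl_cons]
      have hfin : (qs.foldl (fun a p => max a p.2) (max d q.2)) = max d m := by
        rw [foldl_max_snd_init, foldl_max_snd_map, hmdef]
      rw [hfin]

-- ===== VERDICT (by name: the statement is the Claim_ definition above) =====
theorem coverage_weights_spec : Claim_equal_coverage_weights := by
  intro windows _
  unfold Spec_coverage_weights coverage_weights coverage_weights_alt
  rw [cw_a_go]
  have : windows.map (fun w => (max w.1 0, w.2.1))
      = (windows.map (fun w => (w.1, w.2.1))).map (fun p => (max p.1 0, p.2)) := by
    simp [List.map_map]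
  rw [this, cwSolve_clamp (windows.map (fun w => (w.1, w.2.1))).length _ 0 (le_refl _)]
  simp
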